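-- pv_equiv track=rewrite | github.com/jdanray/leetcode | largestGoodInteger.py | largestGoodInteger
-- ===== SOURCE A (Python) =====
-- def largestGoodInteger(num):
-- 	L = 3
-- 	i = 0
-- 	res = ''
-- 	for j in range(len(num)):
-- 		if j - 1 >= 0 and num[j] != num[j - 1]:
-- 			i = j
--
-- 		if j - i + 1 == L:
-- 			res = max(res, num[j])
--
-- 	return L * res
-- ===== SOURCE B (Python) =====
-- def largestGoodInteger(num):
--     best = ''
--     i = 0
--     n = len(num)
--     while i < n:
--         ch = num[i]
--         j = i
--         while j < n and num[j] == ch: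
--             j += 1
--         if j - i >= 3 and ch > best:
--             best = ch
--         i = j
--     return best * 3
-- ===== Notes on version B (the rewrite author's own statement) =====
-- stated objective: alternative
-- what changed: Decomposes the string into maximal runs of equal characters (outer loop per run, inner loop finding the run end) and keeps the largest character of any run of length >= 3, instead of A's single indexed pass that tracks the current run's start and updates a running max exactly at offset 3.
import Mathlib
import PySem

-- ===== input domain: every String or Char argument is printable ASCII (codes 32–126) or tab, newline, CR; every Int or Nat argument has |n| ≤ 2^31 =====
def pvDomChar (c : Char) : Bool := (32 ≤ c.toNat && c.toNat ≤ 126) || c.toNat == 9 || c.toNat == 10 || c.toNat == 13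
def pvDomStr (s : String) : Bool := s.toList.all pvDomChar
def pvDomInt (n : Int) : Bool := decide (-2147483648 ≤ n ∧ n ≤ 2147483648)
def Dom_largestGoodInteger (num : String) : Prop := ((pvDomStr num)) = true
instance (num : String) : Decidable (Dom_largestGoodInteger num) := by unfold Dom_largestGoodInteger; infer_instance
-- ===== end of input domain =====

-- B decomposes the string into maximal runs of equal characters and keeps the largest
-- character heading a run of length >= 3, instead of A's single indexed pass that tracks
-- the current run's start (objective: alternative decomposition; same result).

-- ===== PORT A =====
-- Python string max(a, b): returns b iff a < b lexicographically (ties keep a).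
def pyStrLt : List Char → List Char → Bool
  | _, [] => false
  | [], _ :: _ => true
  | a :: as, b :: bs => if a = b then pyStrLt as bs else decide (a < b)

def pyMaxStr (a b : List Char) : List Char := if pyStrLt a b then b else a

def largestGoodInteger (num : String) : String :=
  let lst := num.toList
  let st := (List.range lst.length).foldl (fun (st : Nat × List Char) j =>
      let i := if 1 ≤ j ∧ lst.getD j ' ' ≠ lst.getD (j - 1) ' ' then j else st.1
      let res := if j - i + 1 = 3 then pyMaxStr st.2 [lst.getD j ' '] else st.2
      (i, res)) (0, ([] : List Char))
  String.ofList (st.2 ++ st.2 ++ st.2)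

-- ===== PORT B =====
-- outer while: one step per maximal run; inner while `j += 1` = takeWhile counting the run
def bLoop : List Char → List Char → List Char
  | [], best => best
  | ch :: t, best =>
      let run := ((ch :: t).takeWhile (· = ch)).length
      let best' := if 3 ≤ run ∧ pyStrLt best [ch] then [ch] else best
      bLoop ((ch :: t).drop run) best'
  termination_by l _ => l.length
  decreasing_by
    simp

def largestGoodInteger_alt (num : String) : String :=
  let best := bLoop num.toList []
  String.ofList (best ++ best ++ best)

-- ===== PRECONDITION & SPEC =====
def Spec_largestGoodInteger (num : String) (out : String) : Prop := out = largestGoodInteger_alt num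
instance (num : String) (out : String) : Decidable (Spec_largestGoodInteger num out) := by unfold Spec_largestGoodInteger; infer_instance

-- ===== CLAIM (what is proved, stated in full; the proofs are below) =====
def Claim_equal_largestGoodInteger : Prop := ∀ (num : String), Dom_largestGoodInteger num → Spec_largestGoodInteger num (largestGoodInteger num)

-- ===== LEMMAS AND PROOFS =====

-- the characters that head a run of three equal consecutive characters
def trips : List Char → List Char
  | a :: b :: c :: rest => (if a = b ∧ b = c then [a] else []) ++ trips (b :: c :: rest)
  | _ => []

-- length of the maximal constant suffix run
def headRun : List Char → Nat
  | [] => 0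
  | x :: xs => 1 + (xs.takeWhile (· = x)).length

def runLen (l : List Char) : Nat := headRun l.reverse

-- A's running maximum: [] before any triple is seen, else the largest triple char so far
def maxRes (l : List Char) : List Char :=
  match (trips l).max? with
  | none => []
  | some c => [c]

theorem mem_trips_iff (c : Char) (s : List Char) : c ∈ trips s ↔ [c, c, c] <:+: s := by
  induction s using trips.induct with
  | case1 a b d rest ih =>
      rw [trips, List.infix_cons_iff, List.mem_append, ih]
      have hp : [c, c, c] <+: a :: b :: d :: rest ↔ c = a ∧ c = b ∧ c = d := by
        simp [List.cons_prefix_cons]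
      rw [hp]
      by_cases hc : a = b ∧ b = d
      · obtain ⟨rfl, rfl⟩ := hc
        simp
      · simp [hc]
        intro h1 h2 h3
        exact absurd ⟨h1.symm.trans h2, h2.symm.trans h3⟩ hc
  | case2 x h =>
      rcases x with _ | ⟨a, _ | ⟨b, _ | ⟨d, r⟩⟩⟩
      · simp [trips]
      · constructor
        · intro hm; simp [trips] at hm
        · intro hin; have := hin.length_le; simp at this
      · constructor
        · intro hm; simp [trips] at hm
        · intro hin; have := hin.length_le; simp at this
      · exact absurd rfl (h a b d r)

theorem runLen_append_singleton (l : List Char) (a : Char) :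
    runLen (l ++ [a]) = 1 + (l.reverse.takeWhile (· = a)).length := by
  simp [runLen, headRun]

theorem takeWhile_two_le (p : Char → Bool) (xs ys : List Char) (h : 2 ≤ xs.length) :
    2 ≤ ((xs ++ ys).takeWhile p).length ↔ 2 ≤ (xs.takeWhile p).length := by
  rcases xs with _ | ⟨x, t⟩; · simp at h
  rcases t with _ | ⟨y, t⟩; · simp at h
  simp only [List.cons_append, List.takeWhile_cons]
  by_cases hx : p x
  · by_cases hy : p y
    · simp [hx, hy]
    · simp [hx, hy]
  · simp [hx]

theorem trips_append (l : List Char) (a : Char) :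
    trips (l ++ [a]) = trips l ++ (if 3 ≤ runLen (l ++ [a]) then [a] else []) := by
  induction l using trips.induct with
  | case1 x y z rest ih =>
      have e1 : (x :: y :: z :: rest) ++ [a] = x :: y :: z :: (rest ++ [a]) := rfl
      rw [e1, trips, show (y :: z :: (rest ++ [a])) = (y :: z :: rest) ++ [a] by simp, ih, trips]
      have hcond : (3 ≤ runLen ((y :: z :: rest) ++ [a])) ↔ (3 ≤ runLen ((x :: y :: z :: rest) ++ [a])) := by
        rw [runLen_append_singleton, runLen_append_singleton]
        have hr : (x :: y :: z :: rest).reverse = (y :: z :: rest).reverse ++ [x] := by simp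
        rw [hr]
        have := takeWhile_two_le (· = a) (y :: z :: rest).reverse [x] (by simp)
        omega
      rw [if_congr hcond rfl rfl, List.append_assoc]
      rfl
  | case2 x h =>
      rcases x with _ | ⟨b, _ | ⟨c, _ | ⟨d, t'⟩⟩⟩
      · simp [trips, runLen, headRun]
      · by_cases hb : b = a <;> simp [trips, runLen, headRun, hb]
      · by_cases h1 : b = c <;> by_cases h2 : c = a <;> by_cases hb : b = a <;>
          simp_all [trips, runLen, headRun]
      · exact absurd rfl (h b c d t')

theorem char_max?_concat (xs : List Char) (a : Char) :
    (xs ++ [a]).max? = some (xs.max?.elim a (max · a)) := by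
  cases hm : xs.max? with
  | none =>
      rw [List.max?_eq_none_iff] at hm
      subst hm; simp
  | some m =>
      rw [List.max?_eq_some_iff] at hm ⊢
      refine ⟨?_, ?_⟩
      · rcases le_total m a with h | h
        · simp [max_eq_right h]
        · simp [max_eq_left h]
          exact Or.inl (hm.1)
      · intro b hb
        rcases List.mem_append.1 hb with h | h
        · exact le_trans (hm.2 b h) (le_max_left _ _)
        · simp at h; subst h; exact le_max_right _ _

theorem pyMaxStr_single (m a : Char) : pyMaxStr [m] [a] = [max m a] := by
  by_cases h : m = a
  · subst h; simp [pyMaxStr, pyStrLt]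
  · by_cases hlt : m < a
    · simp [pyMaxStr, pyStrLt, h, hlt, max_eq_right (le_of_lt hlt)]
    · simp [pyMaxStr, pyStrLt, h, hlt, max_eq_left (not_lt.mp hlt)]

theorem three_le_takeWhile_iff (a : Char) (xs : List Char) :
    3 ≤ (xs.takeWhile (· = a)).length ↔ ∃ ys, xs = a :: a :: a :: ys := by
  rcases xs with _ | ⟨x, _ | ⟨y, _ | ⟨z, t⟩⟩⟩
  · simp
  · by_cases hx : x = a <;> simp [hx]
  · by_cases hx : x = a <;> by_cases hy : y = a <;> simp [hx, hy]
  · by_cases hx : x = a <;> by_cases hy : y = a <;> by_cases hz : z = a <;> simp [hx, hy, hz]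

theorem triple_suffix_of_four_le (l : List Char) (a : Char) (h : 4 ≤ runLen (l ++ [a])) :
    a ∈ trips l := by
  rw [runLen_append_singleton] at h
  obtain ⟨ys, hy⟩ := (three_le_takeWhile_iff a l.reverse).1 (by omega)
  have hl : l = ys.reverse ++ [a, a, a] := by
    have := congrArg List.reverse hy
    simpa using this
  rw [mem_trips_iff, hl]
  exact ⟨ys.reverse, [], by simp⟩

theorem maxRes_append (l : List Char) (a : Char) :
    maxRes (l ++ [a]) = if runLen (l ++ [a]) = 3 then pyMaxStr (maxRes l) [a] else maxRes l := by
  unfold maxRes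
  rw [trips_append]
  by_cases h3 : 3 ≤ runLen (l ++ [a])
  · rw [if_pos h3, char_max?_concat]
    by_cases he : runLen (l ++ [a]) = 3
    · rw [if_pos he]
      cases hm : (trips l).max? with
      | none => simp [pyMaxStr, pyStrLt]
      | some m => simp [pyMaxStr_single]
    · rw [if_neg he]
      have ha : a ∈ trips l := triple_suffix_of_four_le l a (by omega)
      cases hm : (trips l).max? with
      | none =>
          rw [List.max?_eq_none_iff] at hm
          simp [hm] at ha
      | some m =>
          have hle : a ≤ m := (List.max?_eq_some_iff.1 hm).2 a ha
          simp [max_eq_left hle]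
  · rw [if_neg h3, if_neg (by omega)]
    simp

theorem runLen_le_length (xs : List Char) : runLen xs ≤ xs.length := by
  rw [runLen, ← List.length_reverse]
  cases h : xs.reverse with
  | nil => simp [headRun]
  | cons y t => simp [headRun]; have := (List.takeWhile_sublist (· = y) (l := t)).length_le; omega

theorem take_succ_eq (lst : List Char) (m : Nat) (h : m < lst.length) :
    lst.take (m + 1) = lst.take m ++ [lst[m]] := by
  rw [List.take_add_one, List.getElem?_eq_getElem h]; rfl

theorem loop_invariant (lst : List Char) (m : Nat) (hm : m ≤ lst.length) :
    (List.range m).foldl (fun (st : Nat × List Char) j =>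
      let i := if 1 ≤ j ∧ lst.getD j ' ' ≠ lst.getD (j - 1) ' ' then j else st.1
      let res := if j - i + 1 = 3 then pyMaxStr st.2 [lst.getD j ' '] else st.2
      (i, res)) (0, ([] : List Char))
    = (m - runLen (lst.take m), maxRes (lst.take m)) := by
  induction m with
  | zero => simp [runLen, headRun, maxRes, trips]
  | succ m ih =>
      have hm' : m < lst.length := hm
      rw [List.range_succ, List.foldl_append, ih (le_of_lt hm'), List.foldl_cons, List.foldl_nil]
      have hgd : lst.getD m ' ' = lst[m] := by
        rw [List.getD_eq_getElem?_getD, List.getElem?_eq_getElem hm']; rfl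
      have htake : lst.take (m + 1) = lst.take m ++ [lst[m]] := take_succ_eq lst m hm'
      have hi : (if 1 ≤ m ∧ lst.getD m ' ' ≠ lst.getD (m - 1) ' ' then m
                  else m - runLen (lst.take m)) = (m + 1) - runLen (lst.take (m + 1)) := by
        rcases m with _ | k
        · simp [htake, runLen, headRun]
        · have hk : k < lst.length := by omega
          have hgb : lst.getD (k + 1 - 1) ' ' = lst[k] := by
            simp [List.getD_eq_getElem?_getD, List.getElem?_eq_getElem hk]
          have hrev : (lst.take (k + 1)).reverse = lst[k] :: (lst.take k).reverse := by
            rw [take_succ_eq lst k hk]; simp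
          by_cases hab : lst[k + 1] = lst[k]
          · have hcond : ¬ (1 ≤ k + 1 ∧ lst.getD (k + 1) ' ' ≠ lst.getD (k + 1 - 1) ' ') := by
              intro hc
              exact hc.2 (by rw [hgd, hgb, hab])
            rw [if_neg hcond]
            have h1 : runLen (lst.take (k + 1 + 1)) = runLen (lst.take (k + 1)) + 1 := by
              rw [htake, runLen_append_singleton, hrev, hab, List.takeWhile_cons]
              simp [runLen, hrev, headRun]
              omega
            have h2 := runLen_le_length (lst.take (k + 1))
            simp [List.length_take] at h2
            omega
          · have hcond : (1 ≤ k + 1 ∧ lst.getD (k + 1) ' ' ≠ lst.getD (k + 1 - 1) ' ') :=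
              ⟨by omega, by rw [hgd, hgb]; exact hab⟩
            rw [if_pos hcond]
            have hba : lst[k] ≠ lst[k + 1] := fun h => hab h.symm
            have h1 : runLen (lst.take (k + 1 + 1)) = 1 := by
              rw [htake, runLen_append_singleton, hrev, List.takeWhile_cons]
              simp [hba]
            omega
      rw [hi]
      have hr1 : 1 ≤ runLen (lst.take (m + 1)) := by
        rw [htake, runLen_append_singleton]; omega
      have hrle : runLen (lst.take (m + 1)) ≤ m + 1 := by
        have := runLen_le_length (lst.take (m + 1))
        simp [List.length_take] at this; omega
      have hcond2 : (m - ((m + 1) - runLen (lst.take (m + 1))) + 1 = 3)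
          ↔ (runLen (lst.take (m + 1)) = 3) := by omega
      refine Prod.ext rfl ?_
      simp only [hgd]
      rw [if_congr hcond2 rfl rfl]
      have hma := maxRes_append (lst.take m) lst[m]
      rw [← htake] at hma
      exact hma.symm

theorem a_eq_spec (num : String) :
    largestGoodInteger num =
      match (trips num.toList).max? with
      | none => ""
      | some c => String.ofList [c, c, c] := by
  show String.ofList _ = _
  rw [loop_invariant num.toList num.toList.length le_rfl, List.take_length]
  cases hm : (trips num.toList).max? with
  | none => simp [maxRes, hm]
  | some c => simp [maxRes, hm]

-- ===== B-side lemmas =====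

theorem pyMaxStr_nil (b : List Char) (hb : b ≠ []) : pyMaxStr [] b = b := by
  rcases b with _ | ⟨c, t⟩
  · exact absurd rfl hb
  · simp [pyMaxStr, pyStrLt]

theorem prefix_two_replicate (ch : Char) (n : Nat) (v : List Char)
    (hv : ∀ x, v.head? = some x → x ≠ ch) :
    ([ch, ch] <+: List.replicate n ch ++ v) ↔ 2 ≤ n := by
  match n with
  | 0 =>
      simp only [List.replicate_zero, List.nil_append]
      constructor
      · intro hp
        rcases v with _ | ⟨x, t⟩
        · simpa using hp.length_le
        · have : ch = x := ((List.cons_prefix_cons).1 hp).1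
          exact absurd rfl (this ▸ hv x rfl)
      · omega
  | 1 =>
      simp only [List.replicate_succ, List.replicate_zero, List.nil_append, List.cons_append]
      constructor
      · intro hp
        have h2 := (List.cons_prefix_cons).1 hp
        rcases v with _ | ⟨x, t⟩
        · simpa using h2.2.length_le
        · have : ch = x := ((List.cons_prefix_cons).1 h2.2).1
          exact absurd rfl (this ▸ hv x rfl)
      · omega
  | (n + 2) =>
      simp [List.replicate_succ, List.cons_prefix_cons]

theorem infix_replicate_append (c ch : Char) (r : Nat) (v : List Char)
    (hv : ∀ x, v.head? = some x → x ≠ ch) :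
    ([c, c, c] <:+: (List.replicate r ch ++ v)) ↔ (c = ch ∧ 3 ≤ r) ∨ [c, c, c] <:+: v := by
  induction r with
  | zero => simp
  | succ n ih =>
      rw [List.replicate_succ, List.cons_append, List.infix_cons_iff, ih]
      constructor
      · rintro (hp | (⟨rfl, h3⟩ | hin))
        · have h1 := (List.cons_prefix_cons).1 hp
          obtain ⟨rfl, h2⟩ := h1
          have : 2 ≤ n := (prefix_two_replicate c n v hv).1 h2
          exact Or.inl ⟨rfl, by omega⟩
        · exact Or.inl ⟨rfl, by omega⟩
        · exact Or.inr hin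
      · rintro (⟨rfl, h3⟩ | hin)
        · by_cases h3' : 3 ≤ n
          · exact Or.inr (Or.inl ⟨rfl, h3'⟩)
          · refine Or.inl ?_
            rw [List.cons_prefix_cons]
            exact ⟨rfl, (prefix_two_replicate c n v hv).2 (by omega)⟩
        · exact Or.inr (Or.inr hin)

theorem takeWhile_eq_replicate (ch : Char) (l : List Char) :
    l.takeWhile (· = ch) = List.replicate (l.takeWhile (· = ch)).length ch := by
  rw [List.eq_replicate_iff]
  refine ⟨rfl, ?_⟩
  intro b hb
  have := List.mem_takeWhile_imp hb
  simpa using this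

theorem drop_len_takeWhile (p : Char → Bool) (l : List Char) :
    l.drop (l.takeWhile p).length = l.dropWhile p := by
  induction l with
  | nil => rfl
  | cons x t ih => by_cases hx : p x <;> simp [hx, ih]

theorem take_len_takeWhile (p : Char → Bool) (l : List Char) :
    l.take (l.takeWhile p).length = l.takeWhile p := by
  induction l with
  | nil => rfl
  | cons x t ih => by_cases hx : p x <;> simp [hx, ih]

theorem drop_takeWhile_head (ch : Char) (l : List Char) (x : Char)
    (hx : (l.drop (l.takeWhile (· = ch)).length).head? = some x) : x ≠ ch := by
  rw [drop_len_takeWhile] at hx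
  have := List.head?_dropWhile_not (p := (· = ch)) (l := l)
  rw [hx] at this
  simpa using this

theorem mem_trips_run (ch : Char) (t : List Char) (c : Char) :
    c ∈ trips (ch :: t) ↔
      (c = ch ∧ 3 ≤ ((ch :: t).takeWhile (· = ch)).length) ∨
      c ∈ trips ((ch :: t).drop ((ch :: t).takeWhile (· = ch)).length) := by
  rw [mem_trips_iff, mem_trips_iff]
  have hsplit : ch :: t =
      List.replicate ((ch :: t).takeWhile (· = ch)).length ch ++
        (ch :: t).drop ((ch :: t).takeWhile (· = ch)).length := by
    conv_lhs => rw [← List.take_append_drop ((ch :: t).takeWhile (· = ch)).length (ch :: t)]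
    rw [take_len_takeWhile, ← takeWhile_eq_replicate]
  conv_lhs => rw [hsplit]
  exact infix_replicate_append c ch _ _ (drop_takeWhile_head ch (ch :: t))

theorem max?_congr_mem (l1 l2 : List Char) (h : ∀ c, c ∈ l1 ↔ c ∈ l2) :
    l1.max? = l2.max? := by
  cases hm : l1.max? with
  | none =>
      rw [List.max?_eq_none_iff] at hm
      subst hm
      have : l2 = [] := by
        rw [List.eq_nil_iff_forall_not_mem]
        intro a ha
        exact (by simpa using (h a).2 ha)
      simp [this]
  | some m =>
      rw [List.max?_eq_some_iff] at hm
      symm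
      rw [List.max?_eq_some_iff]
      exact ⟨(h m).1 hm.1, fun b hb => hm.2 b ((h b).2 hb)⟩

theorem pyMaxStr_assoc_single (best : List Char) (hb : best = [] ∨ ∃ b, best = [b])
    (ch m : Char) : pyMaxStr (pyMaxStr best [ch]) [m] = pyMaxStr best [max ch m] := by
  rcases hb with rfl | ⟨b, rfl⟩
  · rw [pyMaxStr_nil [ch] (by simp), pyMaxStr_nil [max ch m] (by simp), pyMaxStr_single]
  · rw [pyMaxStr_single, pyMaxStr_single, pyMaxStr_single, max_assoc]

theorem bLoop_spec_aux (n : Nat) : ∀ l best : List Char, l.length ≤ n →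
    (best = [] ∨ ∃ b, best = [b]) →
    bLoop l best =
      match (trips l).max? with
      | none => best
      | some c => pyMaxStr best [c] := by
  induction n with
  | zero =>
      intro l best hl _
      have : l = [] := List.eq_nil_of_length_eq_zero (Nat.le_zero.1 hl)
      subst this
      simp [bLoop, trips]
  | succ n ihn =>
      intro l best hl hb
      match l with
      | [] => simp [bLoop, trips]
      | ch :: t =>
        rw [bLoop]
        show bLoop ((ch :: t).drop ((ch :: t).takeWhile (· = ch)).length)
            (if 3 ≤ ((ch :: t).takeWhile (· = ch)).length ∧ pyStrLt best [ch]
              then [ch] else best) = _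
        have hrun1 : 1 ≤ ((ch :: t).takeWhile (· = ch)).length := by
          simp
        have hlen : ((ch :: t).drop ((ch :: t).takeWhile (· = ch)).length).length ≤ n := by
          rw [List.length_drop]
          simp only [List.length_cons] at hl ⊢
          omega
        have hshape : (if 3 ≤ ((ch :: t).takeWhile (· = ch)).length ∧ pyStrLt best [ch]
            then [ch] else best) = [] ∨
            ∃ b, (if 3 ≤ ((ch :: t).takeWhile (· = ch)).length ∧ pyStrLt best [ch]
            then [ch] else best) = [b] := by
          split
          · exact Or.inr ⟨ch, rfl⟩
          · exact hb
        rw [ihn _ _ hlen hshape]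
        by_cases h3 : 3 ≤ ((ch :: t).takeWhile (· = ch)).length
        · -- the run contributes ch as a candidate
          have hupd : (if 3 ≤ ((ch :: t).takeWhile (· = ch)).length ∧ pyStrLt best [ch]
              then [ch] else best) = pyMaxStr best [ch] := by
            rw [pyMaxStr]
            by_cases hlt : pyStrLt best [ch] = true
            · rw [if_pos ⟨h3, hlt⟩, if_pos hlt]
            · rw [if_neg (fun hc => hlt hc.2), if_neg hlt]
          rw [hupd]
          cases hm : (trips ((ch :: t).drop ((ch :: t).takeWhile (· = ch)).length)).max? with
          | none =>
              rw [List.max?_eq_none_iff] at hm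
              have hmax : (trips (ch :: t)).max? = some ch := by
                rw [List.max?_eq_some_iff]
                refine ⟨(mem_trips_run ch t ch).2 (Or.inl ⟨rfl, h3⟩), ?_⟩
                intro b hbm
                rcases (mem_trips_run ch t b).1 hbm with ⟨rfl, _⟩ | hbm'
                · exact le_refl _
                · rw [hm] at hbm'; simp at hbm'
              rw [hmax]
          | some m =>
              have hm' := List.max?_eq_some_iff.1 hm
              have hmax : (trips (ch :: t)).max? = some (max ch m) := by
                rw [List.max?_eq_some_iff]
                constructor
                · rcases le_total ch m with hcm | hcm
                  · rw [max_eq_right hcm]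
                    exact (mem_trips_run ch t m).2 (Or.inr hm'.1)
                  · rw [max_eq_left hcm]
                    exact (mem_trips_run ch t ch).2 (Or.inl ⟨rfl, h3⟩)
                · intro b hbm
                  rcases (mem_trips_run ch t b).1 hbm with ⟨rfl, _⟩ | hbm'
                  · exact le_max_left _ _
                  · exact le_trans (hm'.2 b hbm') (le_max_right _ _)
              rw [hmax]
              exact pyMaxStr_assoc_single best hb ch m
        · -- short run: no new candidate, best unchanged
          have hupd : (if 3 ≤ ((ch :: t).takeWhile (· = ch)).length ∧ pyStrLt best [ch]
              then [ch] else best) = best := if_neg (fun hc => h3 hc.1)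
          rw [hupd]
          have hmem : ∀ c, c ∈ trips (ch :: t) ↔
              c ∈ trips ((ch :: t).drop ((ch :: t).takeWhile (· = ch)).length) := by
            intro c
            rw [mem_trips_run]
            constructor
            · rintro (⟨_, hr⟩ | hc)
              · exact absurd hr h3
              · exact hc
            · exact Or.inr
          rw [max?_congr_mem _ _ hmem]

theorem bLoop_spec (l best : List Char) (hb : best = [] ∨ ∃ b, best = [b]) :
    bLoop l best =
      match (trips l).max? with
      | none => best
      | some c => pyMaxStr best [c] :=
  bLoop_spec_aux l.length l best le_rfl hb

theorem b_eq_spec (num : String) :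
    largestGoodInteger_alt num =
      match (trips num.toList).max? with
      | none => ""
      | some c => String.ofList [c, c, c] := by
  show String.ofList _ = _
  rw [bLoop_spec num.toList [] (Or.inl rfl)]
  cases hm : (trips num.toList).max? with
  | none => simp
  | some c =>
      have : pyMaxStr [] [c] = [c] := pyMaxStr_nil [c] (by simp)
      simp [this]

-- ===== VERDICT (by name: the statement is the Claim_ definition above) =====
theorem largestGoodInteger_spec : Claim_equal_largestGoodInteger := by
  intro num _h
  unfold Spec_largestGoodInteger
  rw [a_eq_spec num, b_eq_spec num]
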